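-- pv_equiv track=rewrite | github.com/Manuel-Leguizamon/speech_analytics | normalizar_archivo.py | unir_etiquetas_consecutivas
-- ===== SOURCE A (Python) =====
-- def unir_etiquetas_consecutivas(lineas: list[str]) -> list[str]:
--     resultado = []
--     linea_actual = ""
--
--     for linea in lineas:
--         etiqueta, texto = linea.split("-", 1)  # Divide en etiqueta y texto
--         if not linea_actual:
--             # Inicializa con la primera etiqueta y texto
--             linea_actual = f"{etiqueta}-{texto}"
--         else:
--             etiqueta_actual, texto_actual = linea_actual.split("-", 1)
--             if etiqueta == etiqueta_actual:
--                 # Une el texto si la etiqueta es la misma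
--                 linea_actual = f"{etiqueta}-{texto_actual} {texto}"
--             else:
--                 # Guarda la línea actual y comienza una nueva
--                 linea_actual = linea_actual.replace("\n", "") + "\n"
--                 resultado.append(linea_actual)
--                 linea_actual = f"{etiqueta}-{texto}"
--
--
--     # Agregar la última línea procesada
--     if linea_actual:
--         resultado.append(linea_actual)
--
--     return resultado
-- ===== SOURCE B (Python) =====
-- def unir_etiquetas_consecutivas(lineas: list[str]) -> list[str]:
--     # Pass 1: split every line eagerly (same ValueError on a line without '-').
--     pares = []
--     for linea in lineas:
--         etiqueta, texto = linea.split("-", 1)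
--         pares.append((etiqueta, texto))
--
--     # Pass 2: group consecutive pairs with the same label.
--     grupos = []
--     for etiqueta, texto in pares:
--         if grupos and grupos[-1][0] == etiqueta:
--             grupos[-1][1].append(texto)
--         else:
--             grupos.append([etiqueta, [texto]])
--
--     # Pass 3: render each group; strip newlines + add '\n' to all but the last.
--     cadenas = [f"{etiqueta}-{' '.join(textos)}" for etiqueta, textos in grupos]
--     return [c.replace("\n", "") + "\n" for c in cadenas[:-1]] + cadenas[-1:]
-- ===== Notes on version B (the rewrite author's own statement) =====
-- stated objective: alternative
-- what changed: A is a single-pass state machine that re-splits and re-concatenates the accumulated current line on every iteration; B decomposes into three passes: split all lines into (label, text) pairs, group consecutive pairs with equal labels, then render each group once with ' '.join and newline-strip all but the last group.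
import Mathlib
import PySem

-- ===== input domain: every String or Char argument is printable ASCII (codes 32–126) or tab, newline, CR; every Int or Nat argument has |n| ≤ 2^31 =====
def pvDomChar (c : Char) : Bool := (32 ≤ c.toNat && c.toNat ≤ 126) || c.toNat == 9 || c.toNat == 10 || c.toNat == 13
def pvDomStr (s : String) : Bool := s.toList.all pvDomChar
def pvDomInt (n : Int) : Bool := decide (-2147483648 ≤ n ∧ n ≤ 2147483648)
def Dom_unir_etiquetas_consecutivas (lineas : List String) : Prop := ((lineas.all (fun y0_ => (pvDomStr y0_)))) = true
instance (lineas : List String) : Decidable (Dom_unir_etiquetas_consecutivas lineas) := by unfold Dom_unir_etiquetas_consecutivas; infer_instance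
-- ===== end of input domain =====

-- B re-decomposes A's single-pass state machine into split-all / group-consecutive / render passes; equal return values on Pre_ (lines that contain '-').

-- ===== PORT A =====
-- s.split("-", 1) over the char list; none = ValueError (no '-' present)
def pvSplit1 : List Char → Option (List Char × List Char)
  | [] => none
  | c :: cs =>
    if c = '-' then some ([], cs)
    else match pvSplit1 cs with
      | none => none
      | some (a, b) => some (c :: a, b)

-- one iteration of A's loop body; state = (resultado, linea_actual), none = ValueError
def stepA (st : List (List Char) × List Char) (linea : String) :
    Option (List (List Char) × List Char) :=
  match pvSplit1 linea.toList with
  | none => none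
  | some (e, t) =>
    if st.2 = [] then some (st.1, e ++ '-' :: t)
    else
      match pvSplit1 st.2 with
      | none => none
      | some (ea, ta) =>
        if e = ea then some (st.1, e ++ '-' :: (ta ++ ' ' :: t))
        else some (st.1 ++ [st.2.filter (· ≠ '\n') ++ ['\n']], e ++ '-' :: t)

def unir_etiquetas_consecutivas (lineas : List String) : List String :=
  match lineas.foldl (fun acc linea => match acc with
      | none => none
      | some st => stepA st linea) (some ([], [])) with
  | none => []   -- Python raises ValueError here; excluded by Pre_
  | some (res, actual) =>
    (if actual = [] then res else res ++ [actual]).map String.mk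

-- ===== PORT B =====
-- pass 1 of Source B: split every line eagerly (none = ValueError)
def pvPairs : List String → Option (List (List Char × List Char))
  | [] => some []
  | l :: ls =>
    match pvSplit1 l.toList, pvPairs ls with
    | some p, some ps => some (p :: ps)
    | _, _ => none

-- pass 2 of Source B: groups kept most-recent-first (transcription of append-to-grupos[-1])
def stepB (gs : List (List Char × List (List Char))) (p : List Char × List Char) :
    List (List Char × List (List Char)) :=
  match gs with
  | (e, ts) :: rest =>
    if p.1 = e then (e, ts ++ [p.2]) :: rest else (p.1, [p.2]) :: (e, ts) :: rest
  | [] => [(p.1, [p.2])]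

-- f"{etiqueta}-{' '.join(textos)}"
def rendB (g : List Char × List (List Char)) : List Char :=
  g.1 ++ '-' :: List.intercalate [' '] g.2

-- c.replace("\n", "") + "\n"
def flushB (s : List Char) : List Char := s.filter (· ≠ '\n') ++ ['\n']

def unir_etiquetas_consecutivas_alt (lineas : List String) : List String :=
  match pvPairs lineas with
  | none => []   -- Python raises ValueError here; excluded by Pre_
  | some pares =>
    let grupos := (pares.foldl stepB []).reverse
    let cadenas := grupos.map rendB
    ((cadenas.dropLast.map flushB) ++
      (match cadenas.getLast? with | none => [] | some c => [c])).map String.mk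

-- ===== PRECONDITION & SPEC =====
-- Pre_ excludes exactly the lines without '-', on which Python A raises ValueError.
def Pre_unir_etiquetas_consecutivas (lineas : List String) : Prop :=
  ∀ l ∈ lineas, '-' ∈ l.toList
instance (lineas : List String) : Decidable (Pre_unir_etiquetas_consecutivas lineas) := by
  unfold Pre_unir_etiquetas_consecutivas; infer_instance

def pvWitness_unir_etiquetas_consecutivas : List String :=
  ["a-hola\n", "a-mundo\n", "b-chau\n"]

def Spec_unir_etiquetas_consecutivas (lineas : List String) (out : List String) : Prop := out = unir_etiquetas_consecutivas_alt lineas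
instance (lineas : List String) (out : List String) : Decidable (Spec_unir_etiquetas_consecutivas lineas out) := by unfold Spec_unir_etiquetas_consecutivas; infer_instance

-- ===== CLAIM (what is proved, stated in full; the proofs are below) =====
def Claim_equal_unir_etiquetas_consecutivas : Prop := ∀ (lineas : List String), Dom_unir_etiquetas_consecutivas lineas → Pre_unir_etiquetas_consecutivas lineas → Spec_unir_etiquetas_consecutivas lineas (unir_etiquetas_consecutivas lineas)

-- ===== LEMMAS AND PROOFS =====

-- the label produced by split("-",1) contains no '-'
theorem pvSplit1_no_dash : ∀ (l a b : List Char), pvSplit1 l = some (a, b) → '-' ∉ a := by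
  intro l
  induction l with
  | nil => intro a b h; simp [pvSplit1] at h
  | cons c cs ih =>
    intro a b h
    by_cases hc : c = '-'
    · simp only [pvSplit1, if_pos hc, Option.some.injEq, Prod.mk.injEq] at h
      rw [← h.1]
      simp
    · simp only [pvSplit1, if_neg hc] at h
      cases hs : pvSplit1 cs with
      | none => rw [hs] at h; simp at h
      | some p =>
        obtain ⟨a', b'⟩ := p
        rw [hs] at h
        simp at h
        have hrec := ih a' b' hs
        rw [← h.1]
        intro hm
        rcases List.mem_cons.mp hm with hh | hh
        · exact hc hh.symm
        · exact hrec hh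

theorem pvSplit1_rend : ∀ (a b : List Char), '-' ∉ a → pvSplit1 (a ++ '-' :: b) = some (a, b) := by
  intro a
  induction a with
  | nil => intro b _; simp [pvSplit1]
  | cons c cs ih =>
    intro b h
    simp at h
    have hc : ¬ c = '-' := fun hh => h.1 hh.symm
    simp [pvSplit1, hc, ih b h.2]

theorem intercalate_single (t : List Char) : List.intercalate [' '] [t] = t := by
  simp [List.intercalate]

theorem intercalate_concat (ts : List (List Char)) (t : List Char) (h : ts ≠ []) :
    List.intercalate [' '] (ts ++ [t]) = List.intercalate [' '] ts ++ ' ' :: t := by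
  induction ts with
  | nil => simp at h
  | cons x xs ih =>
    cases xs with
    | nil => simp [List.intercalate, List.intersperse]
    | cons y ys =>
      have h2 := ih (by simp)
      simp only [List.intercalate, List.cons_append, List.intersperse] at h2 ⊢
      simp [h2]

-- groups invariant: labels are '-'-free, text lists nonempty
def GoodGs (gs : List (List Char × List (List Char))) : Prop :=
  ∀ g ∈ gs, '-' ∉ g.1 ∧ g.2 ≠ []

-- A's (resultado, linea_actual) reconstructed from B's reversed group list
def resOf : List (List Char × List (List Char)) → List (List Char)
  | [] => []
  | _ :: rest => rest.reverse.map (fun g => flushB (rendB g))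

def actOf : List (List Char × List (List Char)) → List Char
  | [] => []
  | g :: _ => rendB g

theorem rendB_ne_nil (g : List Char × List (List Char)) : rendB g ≠ [] := by
  simp [rendB]

theorem fold_none (ls : List String) :
    ls.foldl (fun acc linea => match acc with
      | none => none
      | some st => stepA st linea) none = none := by
  induction ls with
  | nil => rfl
  | cons l ls ih => simpa using ih

theorem main_inv : ∀ (lineas : List String) (gs : List (List Char × List (List Char))),
    GoodGs gs →
    lineas.foldl (fun acc linea => match acc with
      | none => none
      | some st => stepA st linea) (some (resOf gs, actOf gs)) =
    (match pvPairs lineas with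
     | none => none
     | some ps => some (resOf (ps.foldl stepB gs), actOf (ps.foldl stepB gs))) := by
  intro lineas
  induction lineas with
  | nil => intro gs _; simp [pvPairs]
  | cons l ls ih =>
    intro gs hGood
    cases hsl : pvSplit1 l.toList with
    | none =>
      have step : stepA (resOf gs, actOf gs) l = none := by simp [stepA, hsl]
      simp only [List.foldl_cons, step]
      rw [fold_none]
      simp [pvPairs, hsl]
    | some p =>
      obtain ⟨e, t⟩ := p
      have he : '-' ∉ e := pvSplit1_no_dash _ _ _ hsl
      cases gs with
      | nil =>
        have step : stepA (resOf [], actOf []) l = some (resOf [(e, [t])], actOf [(e, [t])]) := by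
          simp [stepA, hsl, resOf, actOf, rendB, intercalate_single]
        have hGood' : GoodGs [(e, [t])] := by
          intro g hg; simp at hg; subst hg; exact ⟨he, by simp⟩
        simp only [List.foldl_cons, step]
        rw [ih _ hGood']
        cases hps : pvPairs ls with
        | none => simp [pvPairs, hsl, hps]
        | some ps => simp [pvPairs, hsl, hps, stepB]
      | cons g rest =>
        obtain ⟨e0, ts0⟩ := g
        have hg0 := hGood (e0, ts0) (by simp)
        have hact : actOf ((e0, ts0) :: rest) = e0 ++ '-' :: List.intercalate [' '] ts0 := by
          simp [actOf, rendB]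
        have hsplit : pvSplit1 (e0 ++ '-' :: List.intercalate [' '] ts0) =
            some (e0, List.intercalate [' '] ts0) := pvSplit1_rend _ _ hg0.1
        by_cases heq : e = e0
        · subst heq
          have step : stepA (resOf ((e, ts0) :: rest), actOf ((e, ts0) :: rest)) l =
              some (resOf ((e, ts0 ++ [t]) :: rest), actOf ((e, ts0 ++ [t]) :: rest)) := by
            simp [stepA, hsl, hact, hsplit, rendB_ne_nil, resOf, actOf, rendB,
              intercalate_concat ts0 t hg0.2]
          have hGood' : GoodGs ((e, ts0 ++ [t]) :: rest) := by
            intro g hg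
            rcases List.mem_cons.mp hg with h | h
            · subst h; exact ⟨hg0.1, by simp⟩
            · exact hGood g (by simp [h])
          simp only [List.foldl_cons, step]
          rw [ih _ hGood']
          cases hps : pvPairs ls with
          | none => simp [pvPairs, hsl, hps]
          | some ps => simp [pvPairs, hsl, hps, stepB]
        · have step : stepA (resOf ((e0, ts0) :: rest), actOf ((e0, ts0) :: rest)) l =
              some (resOf ((e, [t]) :: (e0, ts0) :: rest), actOf ((e, [t]) :: (e0, ts0) :: rest)) := by
            simp [stepA, hsl, hact, hsplit, heq, rendB_ne_nil, resOf, actOf, rendB,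
              flushB, intercalate_single]
          have hGood' : GoodGs ((e, [t]) :: (e0, ts0) :: rest) := by
            intro g hg
            rcases List.mem_cons.mp hg with h | h
            · subst h; exact ⟨he, by simp⟩
            · exact hGood g h
          simp only [List.foldl_cons, step]
          rw [ih _ hGood']
          cases hps : pvPairs ls with
          | none => simp [pvPairs, hsl, hps]
          | some ps => simp [pvPairs, hsl, hps, stepB, heq]

-- ===== VERDICT (by name: the statement is the Claim_ definition above) =====
theorem unir_etiquetas_consecutivas_spec : Claim_equal_unir_etiquetas_consecutivas := by
  intro lineas _ _
  unfold Spec_unir_etiquetas_consecutivas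
  unfold unir_etiquetas_consecutivas unir_etiquetas_consecutivas_alt
  have h := main_inv lineas [] (by intro g hg; simp at hg)
  simp only [resOf, actOf] at h
  rw [h]
  cases hps : pvPairs lineas with
  | none => simp
  | some ps =>
    simp only []
    cases hgs : ps.foldl stepB [] with
    | nil => simp [resOf, actOf]
    | cons g rest =>
      simp [resOf, actOf, rendB_ne_nil, List.dropLast_concat, List.getLast?_concat]
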